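-- pv_equiv track=rewrite | github.com/theapphiker/CodeWars-solutions | Python/screen_locking_patterns.py | get_blocked_letters
-- ===== SOURCE A (Python) =====
-- def get_blocked_letters(path, node):
--     """Returns a previously blocked letter if the letter blocking the blocked letter
--     is in the path and can be skipped over. The blocked letter is stored as a
--     dictionary value and the keys are tuples that consist of the blocking letter
--     and the node."""
--     results = []
--     blocked_letters = {
--         ("B", "A"): "C",
--         ("B", "C"): "A",
--         ("E", "D"): "F",
--         ("E", "F"): "D",
--         ("E", "B"): "H",
--         ("E", "H"): "B",
--         ("E", "G"): "C",
--         ("E", "C"): "G",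
--         ("E", "A"): "I",
--         ("E", "I"): "A",
--         ("H", "G"): "I",
--         ("H", "I"): "G",
--         ("F", "C"): "I",
--         ("F", "I"): "C",
--         ("D", "A"): "G",
--         ("D", "G"): "A",
--     }
--     for k in blocked_letters:
--         if k[0] in path and k[1] == node:
--             results.append(blocked_letters[k])
--     return results
-- ===== SOURCE B (Python) =====
-- # B: geometric computation on the 3x3 grid (letters A..I row-major): a letter b is
-- # blocked for `node` iff b is the reflection of node through a midpoint letter m
-- # that lies in path; no table of blocked pairs at all. _MIDS lists the possible
-- # midpoint letters in the order the original table emits results.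
--
-- _COORD = {c: divmod(i, 3) for i, c in enumerate("ABCDEFGHI")}
-- _LETTERS = "ABCDEFGHI"
-- _MIDS = "BEHFD"
--
--
-- def get_blocked_letters(path, node):
--     pos = _COORD.get(node)
--     if pos is None:
--         return []
--     r, c = pos
--     out = []
--     for m in _MIDS:
--         if m == node or m not in path:
--             continue
--         mr, mc = _COORD[m]
--         br, bc = 2 * mr - r, 2 * mc - c
--         if 0 <= br <= 2 and 0 <= bc <= 2:
--             out.append(_LETTERS[3 * br + bc])
--     return out
-- ===== Notes on version B (the rewrite author's own statement) =====
-- stated objective: alternative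
-- what changed: Replaces the scan of the 16-entry blocked-pairs table by a geometric computation on the 3x3 letter grid: the blocked letter is computed as the reflection 2*m - node of the node's coordinates through each candidate midpoint letter m that occurs in path, with a bounds check, so no pair table exists at all.
import Mathlib
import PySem

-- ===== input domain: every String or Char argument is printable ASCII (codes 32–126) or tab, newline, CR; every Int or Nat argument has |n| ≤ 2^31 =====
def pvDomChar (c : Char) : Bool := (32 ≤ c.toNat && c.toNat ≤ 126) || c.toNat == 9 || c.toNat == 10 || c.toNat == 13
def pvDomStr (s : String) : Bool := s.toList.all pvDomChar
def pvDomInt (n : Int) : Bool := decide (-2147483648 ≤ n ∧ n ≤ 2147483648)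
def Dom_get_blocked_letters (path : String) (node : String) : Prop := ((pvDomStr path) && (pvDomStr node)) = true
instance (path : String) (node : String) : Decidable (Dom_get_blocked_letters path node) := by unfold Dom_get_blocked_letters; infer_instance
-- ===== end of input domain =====

-- B replaces A's scan of the 16-entry blocked-pairs table by a geometric computation on the
-- 3x3 letter grid: the blocked letter is the reflection 2*m - node through each midpoint
-- letter m found in path (objective: alternative algorithm, no pair table).

-- ===== PORT A =====
-- A's dict literal has 16 distinct keys, so Python's 'for k in dict' + 'dict[k]' is exactly
-- iteration over the (key, value) items in insertion order; ported as a fold over that list.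
def pvBlockedItems : List ((String × String) × String) :=
  [(("B", "A"), "C"), (("B", "C"), "A"),
   (("E", "D"), "F"), (("E", "F"), "D"),
   (("E", "B"), "H"), (("E", "H"), "B"),
   (("E", "G"), "C"), (("E", "C"), "G"),
   (("E", "A"), "I"), (("E", "I"), "A"),
   (("H", "G"), "I"), (("H", "I"), "G"),
   (("F", "C"), "I"), (("F", "I"), "C"),
   (("D", "A"), "G"), (("D", "G"), "A")]

def get_blocked_letters (path : String) (node : String) : List String :=
  pvBlockedItems.foldl
    (fun results kv =>
      if PySem.Str.isIn kv.1.1 path && (kv.1.2 == node) then results ++ [kv.2] else results)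
    []

-- ===== PORT B =====
-- Python iteration over a str yields 1-character strings; ported as List String
def pvGridLetters : List String := ["A","B","C","D","E","F","G","H","I"]

-- _COORD = {c: divmod(i, 3) for i, c in enumerate("ABCDEFGHI")}
def pvCoord : PySem.Dict String (Int × Int) :=
  (PySem.List.enumerate pvGridLetters).foldl
    (fun d p => d.insert p.2 (PySem.Int.floordiv p.1 3, PySem.Int.mod p.1 3))
    PySem.Dict.empty

def pvMids : List String := ["B","E","H","F","D"]

def get_blocked_letters_alt (path : String) (node : String) : List String :=
  match pvCoord.get? node with
  | none => []
  | some (r, c) =>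
    pvMids.foldl
      (fun out m =>
        if m == node || !(PySem.Str.isIn m path) then out
        else
          match pvCoord.get? m with
          | none => out  -- unreachable: every midpoint letter is a key of pvCoord
          | some (mr, mc) =>
            let br := 2 * mr - r
            let bc := 2 * mc - c
            if 0 ≤ br ∧ br ≤ 2 ∧ 0 ≤ bc ∧ bc ≤ 2 then
              -- index 3*br+bc is in range by the guard; none is unreachable
              match PySem.List.pyGet? pvGridLetters (3 * br + bc) with
              | none => out
              | some b => out ++ [b]
            else out)
      []

-- ===== PRECONDITION & SPEC =====
def Spec_get_blocked_letters (path : String) (node : String) (out : List String) : Prop := out = get_blocked_letters_alt path node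
instance (path : String) (node : String) (out : List String) : Decidable (Spec_get_blocked_letters path node out) := by unfold Spec_get_blocked_letters; infer_instance

-- ===== CLAIM (what is proved, stated in full; the proofs are below) =====
def Claim_equal_get_blocked_letters : Prop := ∀ (path : String) (node : String), Dom_get_blocked_letters path node → Spec_get_blocked_letters path node (get_blocked_letters path node)

-- ===== LEMMAS AND PROOFS =====

lemma pvCoord_eq :
    pvCoord = PySem.Dict.mk
      [("A", (0, 0)), ("B", (0, 1)), ("C", (0, 2)),
       ("D", (1, 0)), ("E", (1, 1)), ("F", (1, 2)),
       ("G", (2, 0)), ("H", (2, 1)), ("I", (2, 2))] := by decide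

-- what one iteration of B's loop contributes, as a list ([] or a singleton)
def pvStep (path node : String) (r c : Int) (m : String) : List String :=
  if m == node || !(PySem.Str.isIn m path) then []
  else
    match pvCoord.get? m with
    | none => []
    | some (mr, mc) =>
      let br := 2 * mr - r
      let bc := 2 * mc - c
      if 0 ≤ br ∧ br ≤ 2 ∧ 0 ≤ bc ∧ bc ≤ 2 then
        match PySem.List.pyGet? pvGridLetters (3 * br + bc) with
        | none => []
        | some b => [b]
      else []

lemma alt_eval (path node : String) (r c : Int) (hn : pvCoord.get? node = some (r, c)) :
    get_blocked_letters_alt path node = pvMids.flatMap (pvStep path node r c) := by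
  have hfun : (fun (out : List String) (m : String) =>
        if m == node || !(PySem.Str.isIn m path) then out
        else
          match pvCoord.get? m with
          | none => out
          | some (mr, mc) =>
            let br := 2 * mr - r
            let bc := 2 * mc - c
            if 0 ≤ br ∧ br ≤ 2 ∧ 0 ≤ bc ∧ bc ≤ 2 then
              match PySem.List.pyGet? pvGridLetters (3 * br + bc) with
              | none => out
              | some b => out ++ [b]
            else out)
      = fun out m => out ++ pvStep path node r c m := by
    funext out m
    unfold pvStep
    split
    · simp
    · cases hm : pvCoord.get? m with
      | none => simp
      | some p =>
        obtain ⟨mr, mc⟩ := p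
        simp only
        split
        · cases hg : PySem.List.pyGet? pvGridLetters (3 * (2 * mr - r) + (2 * mc - c)) <;> simp
        · simp
  unfold get_blocked_letters_alt
  rw [hn]
  dsimp only
  rw [hfun]
  exact PySem.List.foldl_append_eq_flatMap _ _ _

-- ===== VERDICT (by name: the statement is the Claim_ definition above) =====
set_option maxHeartbeats 4000000 in
theorem get_blocked_letters_spec : Claim_equal_get_blocked_letters := by
  intro path node _
  unfold Spec_get_blocked_letters get_blocked_letters
  rw [PySem.List.foldl_append_if
        (p := fun kv => PySem.Str.isIn kv.1.1 path && (kv.1.2 == node))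
        (f := fun kv => kv.2) (l := pvBlockedItems) (acc := [])]
  by_cases hA : node = "A"
  · subst hA
    rw [alt_eval path "A" 0 0 (by decide)]
    cases h1 : PySem.Chars.isIn ['B'] path.toList <;>
    cases h2 : PySem.Chars.isIn ['E'] path.toList <;>
    cases h3 : PySem.Chars.isIn ['H'] path.toList <;>
    cases h4 : PySem.Chars.isIn ['F'] path.toList <;>
    cases h5 : PySem.Chars.isIn ['D'] path.toList <;>
    simp [pvBlockedItems, pvMids, pvStep, pvGridLetters, pvCoord_eq, List.filter,
      PySem.Dict.get?_mk_cons, PySem.List.pyGet?, PySem.List.pyIdx?, h1, h2, h3, h4, h5]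
  by_cases hB : node = "B"
  · subst hB
    rw [alt_eval path "B" 0 1 (by decide)]
    cases h1 : PySem.Chars.isIn ['B'] path.toList <;>
    cases h2 : PySem.Chars.isIn ['E'] path.toList <;>
    cases h3 : PySem.Chars.isIn ['H'] path.toList <;>
    cases h4 : PySem.Chars.isIn ['F'] path.toList <;>
    cases h5 : PySem.Chars.isIn ['D'] path.toList <;>
    simp [pvBlockedItems, pvMids, pvStep, pvGridLetters, pvCoord_eq, List.filter,
      PySem.Dict.get?_mk_cons, PySem.List.pyGet?, PySem.List.pyIdx?, h1, h2, h3, h4, h5]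
  by_cases hC : node = "C"
  · subst hC
    rw [alt_eval path "C" 0 2 (by decide)]
    cases h1 : PySem.Chars.isIn ['B'] path.toList <;>
    cases h2 : PySem.Chars.isIn ['E'] path.toList <;>
    cases h3 : PySem.Chars.isIn ['H'] path.toList <;>
    cases h4 : PySem.Chars.isIn ['F'] path.toList <;>
    cases h5 : PySem.Chars.isIn ['D'] path.toList <;>
    simp [pvBlockedItems, pvMids, pvStep, pvGridLetters, pvCoord_eq, List.filter,
      PySem.Dict.get?_mk_cons, PySem.List.pyGet?, PySem.List.pyIdx?, h1, h2, h3, h4, h5]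
  by_cases hD : node = "D"
  · subst hD
    rw [alt_eval path "D" 1 0 (by decide)]
    cases h1 : PySem.Chars.isIn ['B'] path.toList <;>
    cases h2 : PySem.Chars.isIn ['E'] path.toList <;>
    cases h3 : PySem.Chars.isIn ['H'] path.toList <;>
    cases h4 : PySem.Chars.isIn ['F'] path.toList <;>
    cases h5 : PySem.Chars.isIn ['D'] path.toList <;>
    simp [pvBlockedItems, pvMids, pvStep, pvGridLetters, pvCoord_eq, List.filter,
      PySem.Dict.get?_mk_cons, PySem.List.pyGet?, PySem.List.pyIdx?, h1, h2, h3, h4, h5]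
  by_cases hE : node = "E"
  · subst hE
    rw [alt_eval path "E" 1 1 (by decide)]
    cases h1 : PySem.Chars.isIn ['B'] path.toList <;>
    cases h2 : PySem.Chars.isIn ['E'] path.toList <;>
    cases h3 : PySem.Chars.isIn ['H'] path.toList <;>
    cases h4 : PySem.Chars.isIn ['F'] path.toList <;>
    cases h5 : PySem.Chars.isIn ['D'] path.toList <;>
    simp [pvBlockedItems, pvMids, pvStep, pvGridLetters, pvCoord_eq, List.filter,
      PySem.Dict.get?_mk_cons, PySem.List.pyGet?, PySem.List.pyIdx?, h1, h2, h3, h4, h5]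
  by_cases hF : node = "F"
  · subst hF
    rw [alt_eval path "F" 1 2 (by decide)]
    cases h1 : PySem.Chars.isIn ['B'] path.toList <;>
    cases h2 : PySem.Chars.isIn ['E'] path.toList <;>
    cases h3 : PySem.Chars.isIn ['H'] path.toList <;>
    cases h4 : PySem.Chars.isIn ['F'] path.toList <;>
    cases h5 : PySem.Chars.isIn ['D'] path.toList <;>
    simp [pvBlockedItems, pvMids, pvStep, pvGridLetters, pvCoord_eq, List.filter,
      PySem.Dict.get?_mk_cons, PySem.List.pyGet?, PySem.List.pyIdx?, h1, h2, h3, h4, h5]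
  by_cases hG : node = "G"
  · subst hG
    rw [alt_eval path "G" 2 0 (by decide)]
    cases h1 : PySem.Chars.isIn ['B'] path.toList <;>
    cases h2 : PySem.Chars.isIn ['E'] path.toList <;>
    cases h3 : PySem.Chars.isIn ['H'] path.toList <;>
    cases h4 : PySem.Chars.isIn ['F'] path.toList <;>
    cases h5 : PySem.Chars.isIn ['D'] path.toList <;>
    simp [pvBlockedItems, pvMids, pvStep, pvGridLetters, pvCoord_eq, List.filter,
      PySem.Dict.get?_mk_cons, PySem.List.pyGet?, PySem.List.pyIdx?, h1, h2, h3, h4, h5]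
  by_cases hH : node = "H"
  · subst hH
    rw [alt_eval path "H" 2 1 (by decide)]
    cases h1 : PySem.Chars.isIn ['B'] path.toList <;>
    cases h2 : PySem.Chars.isIn ['E'] path.toList <;>
    cases h3 : PySem.Chars.isIn ['H'] path.toList <;>
    cases h4 : PySem.Chars.isIn ['F'] path.toList <;>
    cases h5 : PySem.Chars.isIn ['D'] path.toList <;>
    simp [pvBlockedItems, pvMids, pvStep, pvGridLetters, pvCoord_eq, List.filter,
      PySem.Dict.get?_mk_cons, PySem.List.pyGet?, PySem.List.pyIdx?, h1, h2, h3, h4, h5]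
  by_cases hI : node = "I"
  · subst hI
    rw [alt_eval path "I" 2 2 (by decide)]
    cases h1 : PySem.Chars.isIn ['B'] path.toList <;>
    cases h2 : PySem.Chars.isIn ['E'] path.toList <;>
    cases h3 : PySem.Chars.isIn ['H'] path.toList <;>
    cases h4 : PySem.Chars.isIn ['F'] path.toList <;>
    cases h5 : PySem.Chars.isIn ['D'] path.toList <;>
    simp [pvBlockedItems, pvMids, pvStep, pvGridLetters, pvCoord_eq, List.filter,
      PySem.Dict.get?_mk_cons, PySem.List.pyGet?, PySem.List.pyIdx?, h1, h2, h3, h4, h5]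
  · -- node is none of the nine letters: A's filter keeps nothing, B's coord lookup misses
    have hn : pvCoord.get? node = none := by
      rw [pvCoord_eq]
      simp [PySem.Dict.get?_mk_cons, PySem.Dict.get?, PySem.Dict.empty,
        Ne.symm hA, Ne.symm hB, Ne.symm hC, Ne.symm hD, Ne.symm hE,
        Ne.symm hF, Ne.symm hG, Ne.symm hH, Ne.symm hI]
    unfold get_blocked_letters_alt
    rw [hn]
    have eA : ("A" == node) = false := beq_eq_false_iff_ne.mpr (Ne.symm hA)
    have eB : ("B" == node) = false := beq_eq_false_iff_ne.mpr (Ne.symm hB)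
    have eC : ("C" == node) = false := beq_eq_false_iff_ne.mpr (Ne.symm hC)
    have eD : ("D" == node) = false := beq_eq_false_iff_ne.mpr (Ne.symm hD)
    have eE : ("E" == node) = false := beq_eq_false_iff_ne.mpr (Ne.symm hE)
    have eF : ("F" == node) = false := beq_eq_false_iff_ne.mpr (Ne.symm hF)
    have eG : ("G" == node) = false := beq_eq_false_iff_ne.mpr (Ne.symm hG)
    have eH : ("H" == node) = false := beq_eq_false_iff_ne.mpr (Ne.symm hH)
    have eI : ("I" == node) = false := beq_eq_false_iff_ne.mpr (Ne.symm hI)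
    simp [pvBlockedItems, List.filter, eA, eB, eC, eD, eE, eF, eG, eH, eI]
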